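-- pv_equiv track=rewrite | github.com/nastyakuzenkova/CSC-Python | anastasiia_kuzenkova_04.py | transition_matrix
-- ===== SOURCE A (Python) =====
-- def transition_matrix(word_list):
--     matrix = {}
--     for i in range(len(word_list) - 2):
--         word_u = word_list[i]
--         word_v = word_list[i + 1]
--         word_next = word_list[i + 2]
--         if (word_u, word_v) not in matrix:
--             matrix[word_u, word_v] = []
--         if word_next not in matrix[word_u, word_v]:
--             matrix[word_u, word_v].append(word_next)
--     return matrix
-- ===== SOURCE B (Python) =====
-- def transition_matrix(word_list):
--     # group-by with per-key rescans: materialize all windows, list the distinct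
--     # (u, v) keys in first-appearance order, then for each key scan the windows
--     # again collecting its distinct next words in first-appearance order.
--     windows = [(word_list[i], word_list[i + 1], word_list[i + 2])
--                for i in range(len(word_list) - 2)]
--     keys = list(dict.fromkeys((u, v) for u, v, _ in windows))
--     return {k: list(dict.fromkeys(w for u, v, w in windows if (u, v) == k))
--             for k in keys}
-- ===== Notes on version B (the rewrite author's own statement) =====
-- stated objective: alternative
-- what changed: A builds the dict in one incremental pass, creating entries and dedup-appending next words as each window is seen; B is a group-by with per-key rescans: it materializes all windows once, computes the distinct (u,v) keys in first-appearance order, and then for each key performs a separate filtered scan of the whole window list, collecting that key's distinct successors.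
import Mathlib
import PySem

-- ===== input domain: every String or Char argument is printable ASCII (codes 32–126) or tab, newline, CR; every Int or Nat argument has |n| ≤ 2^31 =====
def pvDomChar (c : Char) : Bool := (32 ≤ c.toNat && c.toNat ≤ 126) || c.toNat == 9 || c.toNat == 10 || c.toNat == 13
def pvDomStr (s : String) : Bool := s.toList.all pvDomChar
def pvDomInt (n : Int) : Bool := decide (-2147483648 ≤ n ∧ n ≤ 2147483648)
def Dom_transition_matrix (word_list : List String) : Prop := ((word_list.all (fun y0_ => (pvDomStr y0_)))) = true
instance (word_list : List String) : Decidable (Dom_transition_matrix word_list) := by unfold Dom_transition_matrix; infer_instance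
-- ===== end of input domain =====

-- B replaces A's single incremental dict-building pass by a group-by with per-key rescans:
-- materialize the windows, list the distinct (u,v) keys once, then scan the windows again
-- per key for its distinct successors. Objective: alternative (same result, different shape).

-- ===== PORT A =====
-- literal port of A: for i in range(len(word_list) - 2) with indexing (indices are always in range, so pyGetD is exact)
def transition_matrix (word_list : List String) : List (String × String × List String) :=
  let matrix : PySem.Dict (String × String) (List String) :=
    (PySem.List.pyRange 0 ((word_list.length : Int) - 2) 1).foldl
      (fun matrix i =>
        let word_u := PySem.List.pyGetD word_list i ""
        let word_v := PySem.List.pyGetD word_list (i + 1) ""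
        let word_next := PySem.List.pyGetD word_list (i + 2) ""
        let matrix := if matrix.contains (word_u, word_v) then matrix
                      else matrix.insert (word_u, word_v) []
        if word_next ∈ matrix.getD (word_u, word_v) [] then matrix
        else matrix.modify (word_u, word_v) [] (fun l => l ++ [word_next]))
      PySem.Dict.empty
  matrix.items.map (fun p => (p.1.1, p.1.2, p.2))

-- ===== PORT B =====
-- literal port of B: windows comprehension over range(len-2); keys = dict.fromkeys of the pairs
-- (= PySem.List.dedup); then a dict comprehension whose value re-scans windows filtered by the key
def transition_matrix_alt (word_list : List String) : List (String × String × List String) :=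
  let windows := (PySem.List.pyRange 0 ((word_list.length : Int) - 2) 1).map
      (fun i => (PySem.List.pyGetD word_list i "",
                 PySem.List.pyGetD word_list (i + 1) "",
                 PySem.List.pyGetD word_list (i + 2) ""))
  let keys := PySem.List.dedup (windows.map (fun t => (t.1, t.2.1)))
  keys.map (fun k => (k.1, k.2,
    PySem.List.dedup ((windows.filter (fun t => (t.1, t.2.1) == k)).map (fun t => t.2.2))))

-- ===== PRECONDITION & SPEC =====
def Spec_transition_matrix (word_list : List String) (out : List (String × String × List String)) : Prop := out = transition_matrix_alt word_list
instance (word_list : List String) (out : List (String × String × List String)) : Decidable (Spec_transition_matrix word_list out) := by unfold Spec_transition_matrix; infer_instance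

-- ===== CLAIM (what is proved, stated in full; the proofs are below) =====
def Claim_equal_transition_matrix : Prop := ∀ (word_list : List String), Dom_transition_matrix word_list → Spec_transition_matrix word_list (transition_matrix word_list)

-- ===== LEMMAS AND PROOFS =====

-- proof-side names for the two loop bodies
def pvStepA (matrix : PySem.Dict (String × String) (List String)) (word_u word_v word_next : String) :
    PySem.Dict (String × String) (List String) :=
  let matrix := if matrix.contains (word_u, word_v) then matrix
                else matrix.insert (word_u, word_v) []
  if word_next ∈ matrix.getD (word_u, word_v) [] then matrix
  else matrix.modify (word_u, word_v) [] (fun l => l ++ [word_next])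

def pvStepB (d : PySem.Dict (String × String) (List String)) (t : String × String × String) :
    PySem.Dict (String × String) (List String) :=
  d.modify (t.1, t.2.1) [] (fun ws => ws ++ [t.2.2])

-- relation between A's loop state and the unconditional-append grouping fold:
-- A's entries are the ordered dedups of the grouping fold's entries
def pvMapP (p : (String × String) × List String) : (String × String) × List String :=
  (p.1, PySem.List.dedup p.2)

-- one window step preserves the relation
theorem pv_step_rel (dA dB : PySem.Dict (String × String) (List String)) (u v w : String)
    (hR : dA.items = dB.items.map pvMapP) (hnd : dB.keys.Nodup) :
    (pvStepA dA u v w).items = (pvStepB dB (u, v, w)).items.map pvMapP := by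
  have hkeys : dA.keys = dB.keys := by
    simp [PySem.Dict.keys, hR, pvMapP]
  have hndA : dA.keys.Nodup := hkeys ▸ hnd
  have hc : dA.contains (u, v) = dB.contains (u, v) := by
    show dA.items.any (fun p => p.1 == (u, v)) = dB.items.any (fun p => p.1 == (u, v))
    rw [hR, List.any_map]
    rfl
  by_cases hcB : dB.contains (u, v) = true
  · -- key present
    obtain ⟨vs, hget⟩ : ∃ vs, dB.get? (u, v) = some vs := by
      have := PySem.Dict.contains_eq_isSome_get? dB (u, v)
      rw [hcB] at this
      exact Option.isSome_iff_exists.mp this.symm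
    have hmemB : ((u, v), vs) ∈ dB.items := PySem.Dict.mem_items_of_get?_eq_some dB hget
    have hgetDB : dB.getD (u, v) [] = vs := by
      simp [PySem.Dict.getD, hget]
    have hmemA : ((u, v), PySem.List.dedup vs) ∈ dA.items := by
      rw [hR]
      exact List.mem_map.mpr ⟨_, hmemB, rfl⟩
    have hgetDA : dA.getD (u, v) [] = PySem.List.dedup vs :=
      PySem.Dict.getD_of_mem_items dA hmemA hndA []
    have hval : ∀ p ∈ dB.items, p.1 = (u, v) → p.2 = vs := by
      intro p hp hp1
      have : dB.get? (u, v) = some p.2 := by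
        have : (((u, v) : String × String), p.2) ∈ dB.items := by
          rw [← hp1]; exact hp
        exact PySem.Dict.get?_of_mem_items dB this hnd
      rw [hget] at this
      exact (Option.some_injective _ this).symm
    have hcA : dA.contains (u, v) = true := hc.trans hcB
    by_cases hw : w ∈ vs
    · -- w already recorded: A leaves its dict unchanged; B appends a duplicate that dedups away
      have : pvStepA dA u v w = dA := by
        simp [pvStepA, hcA, hgetDA, PySem.List.dedup, PySem.Set.mem_ofList, hw]
      rw [this, hR]
      show dB.items.map pvMapP = (pvStepB dB (u, v, w)).items.map pvMapP
      have hBitems : (pvStepB dB (u, v, w)).items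
          = dB.items.map (fun p => if p.1 == (u, v) then ((u, v), vs ++ [w]) else p) := by
        show (dB.insert (u, v) (dB.getD (u, v) [] ++ [w])).items = _
        rw [hgetDB]
        exact PySem.Dict.items_insert_of_contains dB _ hcB
      rw [hBitems, List.map_map]
      apply List.map_congr_left
      intro p hp
      by_cases hp1 : p.1 = (u, v)
      · have hv2 := hval p hp hp1
        simp only [Function.comp, hp1, beq_self_eq_true, if_pos]
        simp [pvMapP, hp1, hv2, PySem.List.dedup, PySem.Set.ofList_append_singleton,
          PySem.Set.mem_ofList, hw]
      · simp [Function.comp, hp1, pvMapP]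
    · -- new next word: A appends w to the deduped list; B appends w and dedup keeps it last
      have hA : pvStepA dA u v w = dA.modify (u, v) [] (fun l => l ++ [w]) := by
        simp [pvStepA, hcA, hgetDA, PySem.List.dedup, PySem.Set.mem_ofList, hw]
      have hAitems : (pvStepA dA u v w).items
          = dA.items.map (fun p => if p.1 == (u, v) then ((u, v), PySem.List.dedup vs ++ [w]) else p) := by
        rw [hA]
        show (dA.insert (u, v) (dA.getD (u, v) [] ++ [w])).items = _
        rw [hgetDA]
        exact PySem.Dict.items_insert_of_contains dA _ hcA
      have hBitems : (pvStepB dB (u, v, w)).items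
          = dB.items.map (fun p => if p.1 == (u, v) then ((u, v), vs ++ [w]) else p) := by
        show (dB.insert (u, v) (dB.getD (u, v) [] ++ [w])).items = _
        rw [hgetDB]
        exact PySem.Dict.items_insert_of_contains dB _ hcB
      rw [hAitems, hBitems, hR, List.map_map, List.map_map]
      apply List.map_congr_left
      intro p hp
      by_cases hp1 : p.1 = (u, v)
      · have hv2 := hval p hp hp1
        simp [Function.comp, pvMapP, hp1, hv2, PySem.List.dedup, PySem.Set.ofList_append_singleton, hw]
      · simp [Function.comp, pvMapP, hp1]
  · -- key absent in both: both append a fresh entry (u,v) ↦ [w]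
    have hcB' : dB.contains (u, v) = false := eq_false_of_ne_true hcB
    have hcA : dA.contains (u, v) = false := hc.trans hcB'
    have hnk : ((u, v) : String × String) ∉ dA.keys := by
      intro h
      have hh := (PySem.Dict.contains_iff_mem_keys dA (u, v)).mpr h
      rw [hcA] at hh
      cases hh
    have hkA : ∀ p ∈ dA.items, (p.1 == ((u, v) : String × String)) = false := by
      intro p hp
      simp only [beq_eq_false_iff_ne, ne_eq]
      intro h
      exact hnk (h ▸ List.mem_map.mpr ⟨p, hp, rfl⟩)
    have hins : (dA.insert (u, v) ([] : List String)).items = dA.items ++ [((u, v), [])] :=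
      PySem.Dict.items_insert_of_not_contains dA [] hcA
    have hcA' : (dA.insert (u, v) ([] : List String)).contains (u, v) = true :=
      PySem.Dict.contains_insert_self dA (u, v) []
    have hgetD' : (dA.insert (u, v) ([] : List String)).getD (u, v) [] = [] :=
      PySem.Dict.getD_insert_self dA (u, v) [] []
    have hAitems : (pvStepA dA u v w).items = dA.items ++ [((u, v), [w])] := by
      have e1 : pvStepA dA u v w = (dA.insert (u, v) []).modify (u, v) [] (fun l => l ++ [w]) := by
        simp [pvStepA, hcA, hgetD']
      rw [e1]
      show ((dA.insert (u, v) []).insert (u, v)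
        (((dA.insert (u, v) []).getD (u, v) []) ++ [w])).items = _
      rw [hgetD', PySem.Dict.items_insert_of_contains _ _ hcA', hins, List.map_append]
      congr 1
      · exact (List.map_congr_left (fun p hp => by simp [hkA p hp])).trans (List.map_id _)
      · simp
    have hBitems : (pvStepB dB (u, v, w)).items = dB.items ++ [((u, v), [w])] := by
      show (dB.insert (u, v) (dB.getD (u, v) [] ++ [w])).items = _
      rw [PySem.Dict.getD_of_not_contains dB [] hcB']
      simpa using PySem.Dict.items_insert_of_not_contains dB [w] hcB'
    rw [hAitems, hBitems, List.map_append, hR]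
    have hded : PySem.Set.ofList [w] = [w] := PySem.Set.ofList_eq_self_of_nodup [w] (by simp)
    simp [pvMapP, PySem.List.dedup, hded]

theorem pv_nodup_stepB (dB : PySem.Dict (String × String) (List String))
    (t : String × String × String) (hnd : dB.keys.Nodup) : (pvStepB dB t).keys.Nodup := by
  show (dB.insert (t.1, t.2.1) (dB.getD (t.1, t.2.1) [] ++ [t.2.2])).keys.Nodup
  exact PySem.Dict.nodup_keys_insert _ _ _ hnd

-- the relation carries through the whole window loop
theorem pv_fold_rel (ts : List (String × String × String)) :
    ∀ (dA dB : PySem.Dict (String × String) (List String)),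
      dA.items = dB.items.map pvMapP → dB.keys.Nodup →
      (ts.foldl (fun d t => pvStepA d t.1 t.2.1 t.2.2) dA).items
        = (ts.foldl pvStepB dB).items.map pvMapP := by
  induction ts with
  | nil => intro dA dB hR _; simpa using hR
  | cons t ts ih =>
    intro dA dB hR hnd
    simp only [List.foldl_cons]
    exact ih _ _ (pv_step_rel dA dB t.1 t.2.1 t.2.2 hR hnd) (pv_nodup_stepB dB t hnd)

-- the grouping fold characterised: keys in first-appearance order, value = all next words for that key
theorem pv_foldB_items (ts : List (String × String × String)) :
    (ts.foldl pvStepB PySem.Dict.empty).items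
      = (PySem.Set.ofList (ts.map (fun t => (t.1, t.2.1)))).map
          (fun k => (k, ((ts.map (fun t => ((t.1, t.2.1), t.2.2))).filter
            (fun p => p.1 == k)).map (fun p => p.2))) := by
  have hfold : ts.foldl pvStepB PySem.Dict.empty
      = (ts.map (fun t => ((t.1, t.2.1), t.2.2))).foldl
          (fun d p => d.modify p.1 [] (fun ws => ws ++ [p.2])) PySem.Dict.empty := by
    rw [List.foldl_map]
    rfl
  have hkeys : (ts.foldl pvStepB PySem.Dict.empty).keys
      = PySem.Set.ofList (ts.map (fun t => (t.1, t.2.1))) := by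
    have := PySem.Dict.keys_foldl_modify_key ts (fun t => (t.1, t.2.1)) ([] : List String)
      (fun _ t => (fun ws => ws ++ [t.2.2])) PySem.Dict.empty
    simpa [pvStepB, PySem.Dict.keys_empty, PySem.Set.update, PySem.Set.ofList] using this
  have hnd : (ts.foldl pvStepB PySem.Dict.empty).keys.Nodup := by
    rw [hkeys]; exact PySem.Set.nodup_ofList _
  have hitems := PySem.Dict.items_eq_map_keys (ts.foldl pvStepB PySem.Dict.empty) hnd ([] : List String)
  rw [hitems, hkeys]
  apply List.map_congr_left
  intro k _
  congr 1
  rw [hfold]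
  have := PySem.Dict.getD_foldl_modify_append (ts.map (fun t => ((t.1, t.2.1), t.2.2)))
    (PySem.Dict.empty (κ := String × String) (ν := List String)) k
  simpa [PySem.Dict.getD_empty] using this

-- ===== VERDICT (by name: the statement is the Claim_ definition above) =====
theorem transition_matrix_spec : Claim_equal_transition_matrix := by
  intro word_list _
  show transition_matrix word_list = transition_matrix_alt word_list
  show ((PySem.List.pyRange 0 ((word_list.length : Int) - 2) 1).foldl
      (fun matrix i =>
        let word_u := PySem.List.pyGetD word_list i ""
        let word_v := PySem.List.pyGetD word_list (i + 1) ""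
        let word_next := PySem.List.pyGetD word_list (i + 2) ""
        let matrix := if matrix.contains (word_u, word_v) then matrix
                      else matrix.insert (word_u, word_v) []
        if word_next ∈ matrix.getD (word_u, word_v) [] then matrix
        else matrix.modify (word_u, word_v) [] (fun l => l ++ [word_next]))
      PySem.Dict.empty).items.map (fun p => (p.1.1, p.1.2, p.2))
    = (PySem.List.dedup (((PySem.List.pyRange 0 ((word_list.length : Int) - 2) 1).map
        (fun i => (PySem.List.pyGetD word_list i "",
                   PySem.List.pyGetD word_list (i + 1) "",
                   PySem.List.pyGetD word_list (i + 2) ""))).map (fun t => (t.1, t.2.1)))).map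
      (fun k => (k.1, k.2,
        PySem.List.dedup (((((PySem.List.pyRange 0 ((word_list.length : Int) - 2) 1).map
          (fun i => (PySem.List.pyGetD word_list i "",
                     PySem.List.pyGetD word_list (i + 1) "",
                     PySem.List.pyGetD word_list (i + 2) ""))).filter
            (fun t => (t.1, t.2.1) == k)).map (fun t => t.2.2)))))
  set W := (PySem.List.pyRange 0 ((word_list.length : Int) - 2) 1).map
      (fun i => (PySem.List.pyGetD word_list i "",
                 PySem.List.pyGetD word_list (i + 1) "",
                 PySem.List.pyGetD word_list (i + 2) "")) with hW
  have hA : (PySem.List.pyRange 0 ((word_list.length : Int) - 2) 1).foldl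
      (fun matrix i =>
        let word_u := PySem.List.pyGetD word_list i ""
        let word_v := PySem.List.pyGetD word_list (i + 1) ""
        let word_next := PySem.List.pyGetD word_list (i + 2) ""
        let matrix := if matrix.contains (word_u, word_v) then matrix
                      else matrix.insert (word_u, word_v) []
        if word_next ∈ matrix.getD (word_u, word_v) [] then matrix
        else matrix.modify (word_u, word_v) [] (fun l => l ++ [word_next]))
      PySem.Dict.empty
    = W.foldl (fun d t => pvStepA d t.1 t.2.1 t.2.2) PySem.Dict.empty := by
    rw [hW, List.foldl_map]
    rfl
  rw [hA, pv_fold_rel W PySem.Dict.empty PySem.Dict.empty rfl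
    (by simp [PySem.Dict.keys_empty]), pv_foldB_items W, List.map_map, List.map_map,
    PySem.List.dedup_eq_ofList]
  apply List.map_congr_left
  intro k _
  simp only [Function.comp, pvMapP, List.filter_map, List.map_map]
  rfl
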